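-- pv_equiv track=rewrite | github.com/JustGoingViral/GolferCaddie- | backend/app/services/course_ai.py | _analyze_weather_correlation
-- ===== SOURCE A (Python) =====
-- from typing import Dict, List, Optional
--
-- def _analyze_weather_correlation(performances: List[Dict]) -> Dict:
--     """Analyze how weather affects performance"""
--     weather_performance = {}
--
--     for perf in performances:
--         weather = perf.get("weather_conditions", "unknown")
--         if weather not in weather_performance:
--             weather_performance[weather] = {"good": 0, "poor": 0}
--
--         if perf.get("result") in ["birdie", "par"]:
--             weather_performance[weather]["good"] += 1
--         else:
--             weather_performance[weather]["poor"] += 1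
--
--     return weather_performance
-- ===== SOURCE B (Python) =====
-- def _analyze_weather_correlation(performances):
--     """Two-phase: group results by weather first, then count per group."""
--     groups = {}
--     for perf in performances:
--         groups.setdefault(perf.get("weather_conditions", "unknown"), []).append(perf.get("result"))
--     return {
--         weather: {
--             "good": sum(1 for r in results if r in ("birdie", "par")),
--             "poor": sum(1 for r in results if r not in ("birdie", "par")),
--         }
--         for weather, results in groups.items()
--     }
-- ===== Notes on version B (the rewrite author's own statement) =====
-- stated objective: alternative
-- what changed: Replaces the single accumulating pass that keeps per-weather good/poor counters with a two-phase decomposition: first group the raw results by weather (first-appearance order, 'unknown' default), then count good/poor per group in a dict comprehension.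
import Mathlib
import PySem

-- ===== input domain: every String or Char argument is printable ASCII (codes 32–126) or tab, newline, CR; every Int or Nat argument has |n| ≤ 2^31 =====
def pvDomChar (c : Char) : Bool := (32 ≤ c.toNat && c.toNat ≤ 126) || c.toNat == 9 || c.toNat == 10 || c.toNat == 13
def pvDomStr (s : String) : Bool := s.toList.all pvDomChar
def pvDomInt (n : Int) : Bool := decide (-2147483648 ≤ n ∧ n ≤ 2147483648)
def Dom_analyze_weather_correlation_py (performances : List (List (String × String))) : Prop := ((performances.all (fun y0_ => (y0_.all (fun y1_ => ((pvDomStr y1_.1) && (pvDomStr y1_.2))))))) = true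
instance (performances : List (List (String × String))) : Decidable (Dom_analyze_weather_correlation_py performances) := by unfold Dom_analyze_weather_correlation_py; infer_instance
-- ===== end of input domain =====

-- B replaces A's single accumulating counter pass by a two-phase decomposition
-- (group results by weather, then count each group); same cost, no speed claim.


-- ===== PORT A =====
def analyze_weather_correlation_py (performances : List (List (String × String))) : List (String × List (String × Int)) :=
  let weather_performance : PySem.Dict String (PySem.Dict String Int) :=
    performances.foldl (fun wp perf =>
      let weather := (PySem.Dict.mk perf).getD "weather_conditions" "unknown"
      let wp := if wp.contains weather then wp
                else wp.insert weather (PySem.Dict.mk [("good", 0), ("poor", 0)])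
      if ((PySem.Dict.mk perf).get? "result" == some "birdie"
          || (PySem.Dict.mk perf).get? "result" == some "par") then
        wp.modify weather PySem.Dict.empty (fun inner => inner.modify "good" 0 (· + 1))
      else
        wp.modify weather PySem.Dict.empty (fun inner => inner.modify "poor" 0 (· + 1)))
      PySem.Dict.empty
  weather_performance.items.map (fun p => (p.1, p.2.items))

-- ===== PORT B =====
def analyze_weather_correlation_py_alt (performances : List (List (String × String))) : List (String × List (String × Int)) :=
  let groups : PySem.Dict String (List (Option String)) :=
    performances.foldl (fun g perf =>
      g.modify ((PySem.Dict.mk perf).getD "weather_conditions" "unknown") []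
        (· ++ [(PySem.Dict.mk perf).get? "result"]))
      PySem.Dict.empty
  groups.items.map (fun q =>
    (q.1, [("good", (q.2.countP (fun r => r == some "birdie" || r == some "par") : Int)),
           ("poor", (q.2.countP (fun r => !(r == some "birdie" || r == some "par")) : Int))]))

-- ===== PRECONDITION & SPEC =====
def Spec_analyze_weather_correlation_py (performances : List (List (String × String))) (out : List (String × List (String × Int))) : Prop := out = analyze_weather_correlation_py_alt performances
instance (performances : List (List (String × String))) (out : List (String × List (String × Int))) : Decidable (Spec_analyze_weather_correlation_py performances out) := by unfold Spec_analyze_weather_correlation_py; infer_instance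

-- ===== CLAIM (what is proved, stated in full; the proofs are below) =====
def Claim_equal_analyze_weather_correlation_py : Prop := ∀ (performances : List (List (String × String))), Dom_analyze_weather_correlation_py performances → Spec_analyze_weather_correlation_py performances (analyze_weather_correlation_py performances)

-- ===== LEMMAS AND PROOFS =====

-- the good/bad test on one result, and the inner counter dict a group of results denotes
def pvGood (r : Option String) : Bool := r == some "birdie" || r == some "par"

def pvCDict (rs : List (Option String)) : PySem.Dict String Int :=
  PySem.Dict.mk [("good", (rs.countP pvGood : Int)), ("poor", (rs.countP (fun r => !pvGood r) : Int))]

-- A's / B's loop bodies, over the precomputed (weather, result) pair of one performance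
def pvStepA (wp : PySem.Dict String (PySem.Dict String Int)) (p : String × Option String) :
    PySem.Dict String (PySem.Dict String Int) :=
  let wp := if wp.contains p.1 then wp
            else wp.insert p.1 (PySem.Dict.mk [("good", 0), ("poor", 0)])
  if pvGood p.2 then
    wp.modify p.1 PySem.Dict.empty (fun inner => inner.modify "good" 0 (· + 1))
  else
    wp.modify p.1 PySem.Dict.empty (fun inner => inner.modify "poor" 0 (· + 1))

def pvStepB (g : PySem.Dict String (List (Option String))) (p : String × Option String) :
    PySem.Dict String (List (Option String)) :=
  g.modify p.1 [] (· ++ [p.2])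

-- the relation maintained between A's state and B's state
def pvRel (dA : PySem.Dict String (PySem.Dict String Int))
    (dB : PySem.Dict String (List (Option String))) : Prop :=
  dA.items = dB.items.map (fun q => (q.1, pvCDict q.2))

lemma pvCDict_append_good (rs : List (Option String)) (r : Option String) (h : pvGood r = true) :
    pvCDict (rs ++ [r]) = (pvCDict rs).modify "good" 0 (· + 1) := by
  simp [pvCDict, PySem.Dict.modify, PySem.Dict.insert, PySem.Dict.getD, PySem.Dict.get?,
    PySem.Dict.contains, List.countP_append, h]

lemma pvCDict_append_poor (rs : List (Option String)) (r : Option String) (h : pvGood r = false) :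
    pvCDict (rs ++ [r]) = (pvCDict rs).modify "poor" 0 (· + 1) := by
  simp [pvCDict, PySem.Dict.modify, PySem.Dict.insert, PySem.Dict.getD, PySem.Dict.get?,
    PySem.Dict.contains, List.countP_append, h]

lemma pvRel_keys {dA : PySem.Dict String (PySem.Dict String Int)}
    {dB : PySem.Dict String (List (Option String))} (h : pvRel dA dB) : dA.keys = dB.keys := by
  simp only [PySem.Dict.keys, pvRel] at *
  rw [h, List.map_map]
  rfl

lemma pvRel_contains {dA : PySem.Dict String (PySem.Dict String Int)}
    {dB : PySem.Dict String (List (Option String))} (h : pvRel dA dB) (k : String) :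
    dA.contains k = dB.contains k := by
  rw [PySem.Dict.contains_eq_decide_mem_keys, PySem.Dict.contains_eq_decide_mem_keys, pvRel_keys h]

lemma pvStep_rel (dA : PySem.Dict String (PySem.Dict String Int))
    (dB : PySem.Dict String (List (Option String))) (p : String × Option String)
    (hrel : pvRel dA dB) (hnd : dB.keys.Nodup) : pvRel (pvStepA dA p) (pvStepB dB p) := by
  by_cases hc : dB.contains p.1 = true
  · -- the weather key is already present: both sides rewrite its value in place
    have hcA : dA.contains p.1 = true := by rw [pvRel_contains hrel]; exact hc
    -- the current group of p.1 in dB, and the matching counter dict in dA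
    have hs : (dB.get? p.1).isSome := by
      rw [← PySem.Dict.contains_eq_isSome_get?]; exact hc
    obtain ⟨rs, hrs⟩ := Option.isSome_iff_exists.mp hs
    have hmem : (p.1, rs) ∈ dB.items := PySem.Dict.mem_items_of_get?_eq_some dB hrs
    have hBget : dB.getD p.1 [] = rs := PySem.Dict.getD_of_mem_items dB hmem hnd []
    have hmemA : (p.1, pvCDict rs) ∈ dA.items := by
      rw [hrel]; exact List.mem_map_of_mem hmem
    have hndA : dA.keys.Nodup := by rw [pvRel_keys hrel]; exact hnd
    have hAget : dA.getD p.1 PySem.Dict.empty = pvCDict rs :=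
      PySem.Dict.getD_of_mem_items dA hmemA hndA _
    have main : ∀ (kk : String),
        (pvCDict rs).modify kk 0 (· + 1) = pvCDict (rs ++ [p.2]) →
        pvRel (dA.modify p.1 PySem.Dict.empty (fun inner => inner.modify kk 0 (· + 1)))
              (pvStepB dB p) := by
      intro kk hkk
      have eA : dA.modify p.1 PySem.Dict.empty (fun inner => inner.modify kk 0 (· + 1))
          = dA.insert p.1 (pvCDict (rs ++ [p.2])) := by
        simp only [PySem.Dict.modify] at hkk ⊢
        rw [hAget, hkk]
      have eB : pvStepB dB p = dB.insert p.1 (rs ++ [p.2]) := by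
        unfold pvStepB
        simp only [PySem.Dict.modify]
        rw [hBget]
      unfold pvRel
      rw [eA, eB, PySem.Dict.items_insert_of_contains dA _ hcA,
        PySem.Dict.items_insert_of_contains dB _ hc, hrel, List.map_map, List.map_map]
      apply List.map_congr_left
      intro q _
      by_cases hq : (q.1 == p.1) = true
      · simp [Function.comp, hq]
      · simp only [Bool.not_eq_true] at hq
        simp [Function.comp, hq]
    unfold pvStepA
    by_cases hg : pvGood p.2 = true
    · rw [if_pos hg, if_pos hcA]
      exact main "good" (pvCDict_append_good rs p.2 hg).symm
    · have hg' : pvGood p.2 = false := by simpa using hg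
      rw [if_neg hg, if_pos hcA]
      exact main "poor" (pvCDict_append_poor rs p.2 hg').symm
  · -- fresh weather key: both sides append a new entry
    have hc' : dB.contains p.1 = false := by simpa using hc
    have hcA : dA.contains p.1 = false := by rw [pvRel_contains hrel]; exact hc'
    have hBget : dB.getD p.1 [] = [] := PySem.Dict.getD_of_not_contains dB [] hc'
    have hnotmemA : ∀ q ∈ dA.items, q.1 ≠ p.1 := by
      intro q hq hq1
      have : p.1 ∈ dA.keys := by
        simp only [PySem.Dict.keys]; exact hq1 ▸ List.mem_map_of_mem hq
      rw [PySem.Dict.contains_eq_decide_mem_keys] at hcA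
      simp [this] at hcA
    -- A inserts the zero counter, then rewrites it in place
    have hcd' : (dA.insert p.1 (PySem.Dict.mk [("good", (0:Int)), ("poor", 0)])).contains p.1
        = true := PySem.Dict.contains_insert_self dA _ _
    have hgd' := PySem.Dict.getD_insert_self dA p.1
      (PySem.Dict.mk [("good", (0:Int)), ("poor", 0)]) PySem.Dict.empty
    have hitems' := PySem.Dict.items_insert_of_not_contains dA
      (PySem.Dict.mk [("good", (0:Int)), ("poor", 0)]) hcA
    have hmod : ∀ (kk : String),
        ((dA.insert p.1 (PySem.Dict.mk [("good", (0:Int)), ("poor", 0)])).modify p.1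
          PySem.Dict.empty (fun inner => inner.modify kk 0 (· + 1))).items
        = dA.items ++ [(p.1, (PySem.Dict.mk [("good", (0:Int)), ("poor", 0)]).modify kk 0 (· + 1))] := by
      intro kk
      simp only [PySem.Dict.modify]
      rw [hgd', PySem.Dict.items_insert_of_contains _ _ hcd', hitems', List.map_append]
      congr 1
      · calc List.map _ dA.items = List.map id dA.items := List.map_congr_left (by
            intro q hq; simp [hnotmemA q hq])
          _ = dA.items := List.map_id _
      · simp
    have hstepA : (pvStepA dA p).items = dA.items ++ [(p.1, pvCDict [p.2])] := by
      unfold pvStepA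
      by_cases hg : pvGood p.2 = true
      · rw [if_pos hg, if_neg (show ¬ dA.contains p.1 = true by simp [hcA]), hmod "good"]
        have : (PySem.Dict.mk [("good", (0:Int)), ("poor", 0)]).modify "good" 0 (· + 1)
            = pvCDict [p.2] := by
          simp [pvCDict, PySem.Dict.modify, PySem.Dict.insert, PySem.Dict.getD, PySem.Dict.get?,
            PySem.Dict.contains, hg]
        rw [this]
      · have hg' : pvGood p.2 = false := by simpa using hg
        rw [if_neg hg, if_neg (show ¬ dA.contains p.1 = true by simp [hcA]), hmod "poor"]
        have : (PySem.Dict.mk [("good", (0:Int)), ("poor", 0)]).modify "poor" 0 (· + 1)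
            = pvCDict [p.2] := by
          simp [pvCDict, PySem.Dict.modify, PySem.Dict.insert, PySem.Dict.getD, PySem.Dict.get?,
            PySem.Dict.contains, hg']
        rw [this]
    have hstepB : (pvStepB dB p).items = dB.items ++ [(p.1, [p.2])] := by
      unfold pvStepB
      simp only [PySem.Dict.modify]
      rw [PySem.Dict.items_insert_of_not_contains dB _ hc', hBget]
      simp
    unfold pvRel
    rw [hstepA, hstepB, List.map_append, hrel]
    rfl

lemma pvStepB_nodup (dB : PySem.Dict String (List (Option String))) (p : String × Option String)
    (hnd : dB.keys.Nodup) : (pvStepB dB p).keys.Nodup := by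
  have := PySem.Dict.nodup_keys_foldl_modify_key [p] (fun q => q.1) []
    (fun _ q l => l ++ [q.2]) dB hnd
  simpa [pvStepB] using this

lemma pvFold_rel (l : List (String × Option String)) :
    ∀ (dA : PySem.Dict String (PySem.Dict String Int))
      (dB : PySem.Dict String (List (Option String))),
      pvRel dA dB → dB.keys.Nodup →
      pvRel (l.foldl pvStepA dA) (l.foldl pvStepB dB) := by
  induction l with
  | nil => intro dA dB h _; simpa using h
  | cons p t ih =>
    intro dA dB h hnd
    simp only [List.foldl_cons]
    exact ih _ _ (pvStep_rel dA dB p h hnd) (pvStepB_nodup dB p hnd)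

-- ===== VERDICT (by name: the statement is the Claim_ definition above) =====
theorem analyze_weather_correlation_py_spec : Claim_equal_analyze_weather_correlation_py := by
  intro performances _
  unfold Spec_analyze_weather_correlation_py
  unfold analyze_weather_correlation_py analyze_weather_correlation_py_alt
  -- view both loops as folds over the precomputed (weather, result) pairs
  have hA : performances.foldl (fun wp perf =>
      let weather := (PySem.Dict.mk perf).getD "weather_conditions" "unknown"
      let wp := if wp.contains weather then wp
                else wp.insert weather (PySem.Dict.mk [("good", 0), ("poor", 0)])
      if ((PySem.Dict.mk perf).get? "result" == some "birdie"
          || (PySem.Dict.mk perf).get? "result" == some "par") then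
        wp.modify weather PySem.Dict.empty (fun inner => inner.modify "good" 0 (· + 1))
      else
        wp.modify weather PySem.Dict.empty (fun inner => inner.modify "poor" 0 (· + 1)))
      PySem.Dict.empty
      = (performances.map (fun perf =>
          ((PySem.Dict.mk perf).getD "weather_conditions" "unknown",
           (PySem.Dict.mk perf).get? "result"))).foldl pvStepA PySem.Dict.empty := by
    rw [List.foldl_map]
    rfl
  have hB : performances.foldl (fun g perf =>
      g.modify ((PySem.Dict.mk perf).getD "weather_conditions" "unknown") []
        (· ++ [(PySem.Dict.mk perf).get? "result"])) PySem.Dict.empty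
      = (performances.map (fun perf =>
          ((PySem.Dict.mk perf).getD "weather_conditions" "unknown",
           (PySem.Dict.mk perf).get? "result"))).foldl pvStepB PySem.Dict.empty := by
    rw [List.foldl_map]
    rfl
  simp only [hA, hB]
  have hrel := pvFold_rel (performances.map (fun perf =>
      ((PySem.Dict.mk perf).getD "weather_conditions" "unknown",
       (PySem.Dict.mk perf).get? "result"))) PySem.Dict.empty PySem.Dict.empty
    (by rfl) (by simp [PySem.Dict.keys, PySem.Dict.empty])
  unfold pvRel at hrel
  rw [hrel, List.map_map]
  rfl
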